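-- pv_equiv track=rewrite | github.com/Mika412/advent-of-code | 2021/day4/main.py | find_board_rows
-- ===== SOURCE A (Python) =====
-- def find_board_rows(input_nums, input_boards):
--     selected_items = []
--     for new_num in input_nums:
--         selected_items.append(new_num)
--         for board in input_boards:
--             for row in board:
--                 if all(elem in selected_items for elem in row):
--                     return selected_items, board
--
--     return None, None
-- ===== SOURCE B (Python) =====
-- def find_board_rows(input_nums, input_boards):
--     # Per-row completion step: a row finishes when its last-drawn element appears.
--     # Pick the row with the smallest (completion step, board index); one pass over
--     # the boards instead of rescanning every board for every drawn number.
--     if not input_nums: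
--         return None, None
--     best = None  # ((step, board_index), board)
--     for bi, board in enumerate(input_boards):
--         for row in board:
--             if all(e in input_nums for e in row):
--                 step = max((input_nums.index(e) for e in row), default=0)
--                 key = (step, bi)
--                 if best is None or key < best[0]:
--                     best = (key, board)
--     if best is None:
--         return None, None
--     (step, _), board = best
--     return input_nums[:step + 1], board
-- ===== Notes on version B (the rewrite author's own statement) =====
-- stated objective: faster
-- what changed: Instead of replaying the draws one by one and rescanning every board row after each draw, B computes each row's completion step (the max first index of its elements in input_nums) in a single pass over the boards and returns the row minimizing (step, board index) lexicographically.
import Mathlib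
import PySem

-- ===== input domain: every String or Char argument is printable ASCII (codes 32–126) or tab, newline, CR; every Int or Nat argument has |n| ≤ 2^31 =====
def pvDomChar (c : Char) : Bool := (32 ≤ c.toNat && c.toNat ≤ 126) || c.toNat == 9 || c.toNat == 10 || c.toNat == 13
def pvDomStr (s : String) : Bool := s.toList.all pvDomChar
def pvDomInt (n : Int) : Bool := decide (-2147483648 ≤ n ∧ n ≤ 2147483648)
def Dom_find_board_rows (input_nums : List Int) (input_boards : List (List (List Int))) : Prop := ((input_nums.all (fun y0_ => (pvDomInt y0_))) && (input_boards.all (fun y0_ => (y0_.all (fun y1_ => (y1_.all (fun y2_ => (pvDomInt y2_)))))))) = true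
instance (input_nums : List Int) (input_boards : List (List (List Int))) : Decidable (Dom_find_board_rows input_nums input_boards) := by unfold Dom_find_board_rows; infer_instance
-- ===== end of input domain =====

-- B replaces A's rescan-every-board-per-drawn-number search by a single pass over the
-- boards that computes each row's completion step and takes the (step, board index)
-- lexicographic minimum; an alternative decomposition with the same return value.

-- ===== PORT A =====
-- 'all(elem in selected_items for elem in row)'
def pvARowDone (sel row : List Int) : Bool := row.all (fun e => sel.contains e)

-- the 'for new_num in input_nums' loop with its early return; the nested
-- 'for board … for row … return' picks the first board with a completed row, i.e. find?
def pvALoop (boards : List (List (List Int))) : List Int → List Int → Option (List Int) × Option (List (List Int))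
  | _, [] => (none, none)
  | sel, n :: rest =>
      let sel' := sel ++ [n]
      match boards.find? (fun b => b.any (pvARowDone sel')) with
      | some b => (some sel', some b)
      | none => pvALoop boards sel' rest

def find_board_rows (input_nums : List Int) (input_boards : List (List (List Int))) : Option (List Int) × Option (List (List Int)) :=
  pvALoop input_boards [] input_nums

-- ===== PORT B =====
-- 'all(e in input_nums for e in row)'
def pvDrawable (nums row : List Int) : Bool := row.all (fun e => nums.contains e)

-- 'input_nums.index(e)'; only evaluated under the pvDrawable guard, where index? is some
def pvIdx (nums : List Int) (e : Int) : Nat := (PySem.List.index? nums e).getD 0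

-- 'max((input_nums.index(e) for e in row), default=0)' (all indices are ≥ 0)
def pvRowStep (nums row : List Int) : Nat := row.foldl (fun m e => max m (pvIdx nums e)) 0

-- 'key < best[0]' on the (step, board_index) pairs
def pvKeyLt (a b : Nat × Nat) : Bool := a.1 < b.1 || (a.1 == b.1 && a.2 < b.2)

-- the inner 'for row in board' loop updating best
def pvBRow (nums : List Int) (bi : Nat) (board : List (List Int))
    (best : Option ((Nat × Nat) × List (List Int))) : Option ((Nat × Nat) × List (List Int)) :=
  board.foldl (fun best row =>
    if pvDrawable nums row then
      let key := (pvRowStep nums row, bi)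
      match best with
      | none => some (key, board)
      | some b => if pvKeyLt key b.1 then some (key, board) else some b
    else best) best

-- the outer 'for bi, board in enumerate(input_boards)' loop
def pvBBoards (nums : List Int) : Nat → List (List (List Int)) → Option ((Nat × Nat) × List (List Int)) → Option ((Nat × Nat) × List (List Int))
  | _, [], best => best
  | bi, board :: rest, best => pvBBoards nums (bi + 1) rest (pvBRow nums bi board best)

def find_board_rows_alt (input_nums : List Int) (input_boards : List (List (List Int))) : Option (List Int) × Option (List (List Int)) :=
  if input_nums.isEmpty then (none, none)
  else
    match pvBBoards input_nums 0 input_boards none with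
    | none => (none, none)
    -- 'input_nums[:step+1]' with step+1 ≥ 0 is exactly take (step+1)
    | some ((step, _), board) => (some (input_nums.take (step + 1)), some board)

-- ===== PRECONDITION & SPEC =====
def Spec_find_board_rows (input_nums : List Int) (input_boards : List (List (List Int))) (out : Option (List Int) × Option (List (List Int))) : Prop := out = find_board_rows_alt input_nums input_boards
instance (input_nums : List Int) (input_boards : List (List (List Int))) (out : Option (List Int) × Option (List (List Int))) : Decidable (Spec_find_board_rows input_nums input_boards out) := by unfold Spec_find_board_rows; infer_instance

-- ===== CLAIM (what is proved, stated in full; the proofs are below) =====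
def Claim_equal_find_board_rows : Prop := ∀ (input_nums : List Int) (input_boards : List (List (List Int))), Dom_find_board_rows input_nums input_boards → Spec_find_board_rows input_nums input_boards (find_board_rows input_nums input_boards)

-- ===== LEMMAS AND PROOFS =====

-- the flat candidate list: ((completion step, board index), board) for every drawable row
def pvCands (nums : List Int) : Nat → List (List (List Int)) → List ((Nat × Nat) × List (List Int))
  | _, [] => []
  | bi, board :: rest =>
      (board.filter (pvDrawable nums)).map (fun row => ((pvRowStep nums row, bi), board))
        ++ pvCands nums (bi + 1) rest
def pvMin (best : Option ((Nat × Nat) × List (List Int))) (c : (Nat × Nat) × List (List Int)) : Option ((Nat × Nat) × List (List Int)) :=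
  match best with
  | none => some c
  | some b => if pvKeyLt c.1 b.1 then some c else some b

theorem pvBRow_foldl_gen (nums : List Int) (bi : Nat) (pay : List (List Int)) :
    ∀ (rows : List (List Int)) (best : Option ((Nat × Nat) × List (List Int))),
    rows.foldl (fun best row => if pvDrawable nums row then pvMin best ((pvRowStep nums row, bi), pay) else best) best =
      ((rows.filter (pvDrawable nums)).map (fun row => ((pvRowStep nums row, bi), pay))).foldl pvMin best := by
  intro rows
  induction rows with
  | nil => intro best; simp
  | cons r rs ih =>
    intro best
    by_cases h : pvDrawable nums r
    · simp only [List.foldl_cons, h, if_pos, List.filter_cons_of_pos h, List.map_cons]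
      exact ih _
    · simp only [List.foldl_cons, h, Bool.false_eq_true,
        List.filter_cons_of_neg (by simp [h] : ¬ pvDrawable nums r = true)]
      exact ih best

theorem pvBRow_eq_foldl (nums : List Int) (bi : Nat) (board : List (List Int))
    (best : Option ((Nat × Nat) × List (List Int))) :
    pvBRow nums bi board best =
      ((board.filter (pvDrawable nums)).map (fun row => ((pvRowStep nums row, bi), board))).foldl pvMin best := by
  rw [← pvBRow_foldl_gen nums bi board board best]
  rfl

theorem pvBBoards_eq_foldl (nums : List Int) :
    ∀ (boards : List (List (List Int))) (bi : Nat) (best : Option ((Nat × Nat) × List (List Int))),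
    pvBBoards nums bi boards best = (pvCands nums bi boards).foldl pvMin best := by
  intro boards
  induction boards with
  | nil => intro bi best; simp [pvBBoards, pvCands]
  | cons b rest ih =>
    intro bi best
    simp only [pvBBoards, pvCands, List.foldl_append]
    rw [ih, pvBRow_eq_foldl]

theorem mem_pvCands (nums : List Int) :
    ∀ (boards : List (List (List Int))) (bi : Nat) (c : (Nat × Nat) × List (List Int)),
    c ∈ pvCands nums bi boards ↔
      ∃ j board row, boards[j]? = some board ∧ row ∈ board ∧ pvDrawable nums row = true ∧
        c = ((pvRowStep nums row, bi + j), board) := by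
  intro boards
  induction boards with
  | nil => intro bi c; simp [pvCands]
  | cons b rest ih =>
    intro bi c
    simp only [pvCands, List.mem_append, List.mem_map, List.mem_filter, ih]
    constructor
    · rintro (⟨row, ⟨hrow, hd⟩, rfl⟩ | ⟨j, board, row, hj, hrow, hd, rfl⟩)
      · exact ⟨0, b, row, by simp, hrow, hd, by simp⟩
      · exact ⟨j + 1, board, row, by simpa using hj, hrow, hd, by simp; omega⟩
    · rintro ⟨j, board, row, hj, hrow, hd, rfl⟩
      cases j with
      | zero =>
        left
        simp at hj
        exact ⟨row, ⟨by rw [hj]; exact hrow, hd⟩, by simp [hj]⟩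
      | succ j =>
        right
        exact ⟨j, board, row, by simpa using hj, hrow, hd, by simp; omega⟩

theorem foldl_pvMin_some (l : List ((Nat × Nat) × List (List Int))) :
    ∀ (b : (Nat × Nat) × List (List Int)),
    ∃ m, l.foldl pvMin (some b) = some m ∧ (m = b ∨ m ∈ l) ∧ pvKeyLt b.1 m.1 = false ∧
      ∀ c ∈ l, pvKeyLt c.1 m.1 = false := by
  induction l with
  | nil =>
    intro b
    refine ⟨b, by simp, Or.inl rfl, ?_, by simp⟩
    simp [pvKeyLt]
  | cons c l ih =>
    intro b
    by_cases h : pvKeyLt c.1 b.1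
    · obtain ⟨m, hm, hmem, hle, hall⟩ := ih c
      refine ⟨m, ?_, ?_, ?_, ?_⟩
      · simpa [pvMin, h] using hm
      · rcases hmem with rfl | hm'
        · exact Or.inr (List.mem_cons_self)
        · exact Or.inr (List.mem_cons_of_mem _ hm')
      · simp only [pvKeyLt] at *
        rcases Nat.lt_trichotomy b.1.1 m.1.1 with h1 | h1 | h1 <;>
          simp_all <;> omega
      · intro x hx
        rcases List.mem_cons.mp hx with rfl | hx'
        · exact hle
        · exact hall x hx'
    · obtain ⟨m, hm, hmem, hle, hall⟩ := ih b
      refine ⟨m, ?_, ?_, hle, ?_⟩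
      · simpa [pvMin, h] using hm
      · rcases hmem with rfl | hm'
        · exact Or.inl rfl
        · exact Or.inr (List.mem_cons_of_mem _ hm')
      · intro x hx
        rcases List.mem_cons.mp hx with rfl | hx'
        · simp only [pvKeyLt] at *
          rcases Nat.lt_trichotomy x.1.1 m.1.1 with h1 | h1 | h1 <;>
            simp_all <;> omega
        · exact hall x hx'

theorem foldl_pvMin_none_eq_none (l : List ((Nat × Nat) × List (List Int))) :
    l.foldl pvMin none = none ↔ l = [] := by
  cases l with
  | nil => simp
  | cons c l =>
    simp only [List.foldl_cons, pvMin]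
    obtain ⟨m, hm, _⟩ := foldl_pvMin_some l c
    simp [hm]

theorem foldl_pvMin_none_some (l : List ((Nat × Nat) × List (List Int)))
    (m : (Nat × Nat) × List (List Int)) (h : l.foldl pvMin none = some m) :
    m ∈ l ∧ ∀ c ∈ l, pvKeyLt c.1 m.1 = false := by
  cases l with
  | nil => simp at h
  | cons c l =>
    simp only [List.foldl_cons, pvMin] at h
    obtain ⟨m', hm', hmem, hle, hall⟩ := foldl_pvMin_some l c
    rw [hm'] at h
    obtain rfl : m' = m := by simpa using h
    refine ⟨?_, ?_⟩
    · rcases hmem with rfl | hm'' 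
      · exact List.mem_cons_self
      · exact List.mem_cons_of_mem _ hm''
    · intro x hx
      rcases List.mem_cons.mp hx with rfl | hx'
      · exact hle
      · exact hall x hx'

theorem pvIdx_cons_of_ne (n e : Int) (rest : List Int) (h : ¬ n = e) (he : e ∈ rest) :
    pvIdx (n :: rest) e = pvIdx rest e + 1 := by
  unfold pvIdx
  rw [PySem.List.index?_cons_of_ne rest h]
  obtain ⟨k, hk⟩ := Option.isSome_iff_exists.mp ((PySem.List.index?_isSome_iff rest e).mpr he)
  rw [PySem.List.index?_eq_idxOf?] at hk
  simp [hk]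

theorem mem_take_iff_pvIdx (nums : List Int) (e : Int) :
    ∀ k : Nat, e ∈ nums.take (k + 1) ↔ (e ∈ nums ∧ pvIdx nums e ≤ k) := by
  induction nums with
  | nil => intro k; simp
  | cons n rest ih =>
    intro k
    by_cases hne : n = e
    · subst hne
      simp [pvIdx, List.idxOf?_cons]
    · constructor
      · intro hmem
        simp only [List.take_succ_cons, List.mem_cons] at hmem
        rcases hmem with rfl | hmem
        · exact absurd rfl hne
        · cases k with
          | zero => simp at hmem
          | succ k' =>
            have := (ih k').mp (by simpa using hmem)
            have hm : e ∈ rest := this.1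
            refine ⟨List.mem_cons_of_mem _ hm, ?_⟩
            rw [pvIdx_cons_of_ne n e rest hne hm]
            omega
      · rintro ⟨hmem, hidx⟩
        have hm : e ∈ rest := by
          rcases List.mem_cons.mp hmem with rfl | h
          · exact absurd rfl hne
          · exact h
        rw [pvIdx_cons_of_ne n e rest hne hm] at hidx
        cases k with
        | zero => omega
        | succ k' =>
          simp only [List.take_succ_cons, List.mem_cons]
          exact Or.inr ((ih k').mpr ⟨hm, by omega⟩)

theorem foldl_max_le (f : Int → Nat) (row : List Int) :
    ∀ (a k : Nat), (row.foldl (fun m e => max m (f e)) a ≤ k ↔ a ≤ k ∧ ∀ e ∈ row, f e ≤ k) := by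
  induction row with
  | nil => intro a k; simp
  | cons r rs ih =>
    intro a k
    simp only [List.foldl_cons, ih, List.mem_cons]
    constructor
    · rintro ⟨h1, h2⟩
      exact ⟨by omega, fun e he => by rcases he with rfl | he; omega; exact h2 e he⟩
    · rintro ⟨h1, h2⟩
      exact ⟨by have := h2 r (Or.inl rfl); omega, fun e he => h2 e (Or.inr he)⟩

theorem pvARowDone_take (nums row : List Int) (k : Nat) :
    pvARowDone (nums.take (k + 1)) row = (pvDrawable nums row && decide (pvRowStep nums row ≤ k)) := by
  simp only [pvARowDone, pvDrawable, pvRowStep]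
  rcases Bool.eq_false_or_eq_true (pvDrawable nums row) with hd | hd <;>
    simp only [pvDrawable] at hd
  case inr =>
    simp only [hd, Bool.false_and]
    rw [List.all_eq_false] at hd
    rw [List.all_eq_false]
    obtain ⟨e, he, hmem⟩ := hd
    refine ⟨e, he, ?_⟩
    simp only [List.contains_eq_mem, decide_eq_true_eq] at hmem ⊢
    intro hc
    exact hmem (List.mem_of_mem_take hc)
  case inl =>
    simp only [hd, Bool.true_and]
    rw [List.all_eq_true] at hd
    by_cases hs : List.foldl (fun m e => max m (pvIdx nums e)) 0 row ≤ k
    · simp only [hs, decide_true]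
      have hall := ((foldl_max_le (pvIdx nums) row 0 k).mp hs).2
      rw [List.all_eq_true]
      intro e he
      simp only [List.contains_eq_mem, decide_eq_true_eq]
      exact (mem_take_iff_pvIdx nums e k).mpr
        ⟨by have := hd e he; simpa using this, hall e he⟩
    · simp only [hs, decide_false]
      have hnot : ¬ (0 ≤ k ∧ ∀ e ∈ row, pvIdx nums e ≤ k) :=
        fun hc => hs ((foldl_max_le (pvIdx nums) row 0 k).mpr hc)
      push Not at hnot
      obtain ⟨e, he, hgt⟩ := hnot (by omega)
      rw [List.all_eq_false]
      refine ⟨e, he, ?_⟩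
      simp only [List.contains_eq_mem, decide_eq_true_eq]
      intro hc
      exact absurd ((mem_take_iff_pvIdx nums e k).mp hc).2 (by omega)

theorem pvIdx_lt_length (nums : List Int) (e : Int) (h : nums ≠ []) :
    pvIdx nums e < nums.length := by
  unfold pvIdx
  cases hidx : PySem.List.index? nums e with
  | none => simpa using List.length_pos_of_ne_nil h
  | some j =>
    simp only [Option.getD_some]
    rw [PySem.List.index?_eq_idxOf?] at hidx
    obtain ⟨hlt, -⟩ := List.idxOf?_eq_some_iff.mp hidx
    exact hlt

theorem pvRowStep_lt_length (nums row : List Int) (h : nums ≠ []) :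
    pvRowStep nums row < nums.length := by
  unfold pvRowStep
  have hlen := List.length_pos_of_ne_nil h
  have := (foldl_max_le (pvIdx nums) row 0 (nums.length - 1)).mpr
    ⟨by omega, fun e _ => by have := pvIdx_lt_length nums e h; omega⟩
  omega

theorem take_succ_of_prefix (nums : List Int) (k : Nat) (x : Int) (rest : List Int)
    (h : nums.take k ++ x :: rest = nums) :
    nums.take (k + 1) = nums.take k ++ [x] ∧ k < nums.length := by
  have hlen : (nums.take k).length = k := by
    have hl := congrArg List.length h
    simp only [List.length_append, List.length_cons, List.length_take] at hl ⊢
    omega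
  have hklt : k < nums.length := by
    have hl := congrArg List.length h
    simp only [List.length_append, List.length_cons] at hl
    omega
  have hget : nums[k]? = some x := by
    conv_lhs => rw [← h]
    rw [List.getElem?_append_right (by omega)]
    simp [hlen]
  refine ⟨?_, hklt⟩
  rw [List.take_add_one, hget]
  rfl

theorem pvALoop_no_cands (nums : List Int) (boards : List (List (List Int)))
    (hno : ∀ b ∈ boards, ∀ row ∈ b, pvDrawable nums row = false) :
    ∀ (l : List Int) (k : Nat), nums.take k ++ l = nums →
    pvALoop boards (nums.take k) l = (none, none) := by
  intro l
  induction l with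
  | nil => intro k _; rfl
  | cons x rest ih =>
    intro k h
    obtain ⟨htake, -⟩ := take_succ_of_prefix nums k x rest h
    simp only [pvALoop, ← htake]
    have hfind : boards.find? (fun b => b.any (pvARowDone (nums.take (k + 1)))) = none := by
      rw [List.find?_eq_none]
      intro b hb
      simp only [Bool.not_eq_true, List.any_eq_false]
      intro row hrow
      rw [pvARowDone_take, hno b hb row hrow]
      rfl
    rw [hfind]
    have h' : nums.take (k + 1) ++ rest = nums := by
      rw [htake, List.append_assoc]
      simpa using h
    exact ih (k + 1) h'

theorem pvALoop_found (nums : List Int) (boards : List (List (List Int)))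
    (s bi : Nat) (board : List (List Int))
    (hsn : s < nums.length)
    (hbi : boards[bi]? = some board)
    (hrow : ∃ row ∈ board, pvDrawable nums row = true ∧ pvRowStep nums row = s)
    (hmin : ∀ (bj : Nat) (b' : List (List Int)) (r' : List Int),
      boards[bj]? = some b' → r' ∈ b' → pvDrawable nums r' = true →
      s ≤ pvRowStep nums r' ∧ (pvRowStep nums r' ≤ s → bi ≤ bj)) :
    ∀ (l : List Int) (k : Nat), nums.take k ++ l = nums → k ≤ s →
    pvALoop boards (nums.take k) l = (some (nums.take (s + 1)), some board) := by
  intro l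
  induction l with
  | nil =>
    intro k h hk
    have hl := congrArg List.length h
    simp only [List.length_append, List.length_nil, List.length_take] at hl
    omega
  | cons x rest ih =>
    intro k h hk
    obtain ⟨htake, hklt⟩ := take_succ_of_prefix nums k x rest h
    simp only [pvALoop, ← htake]
    by_cases hks : k < s
    · have hfind : boards.find? (fun b => b.any (pvARowDone (nums.take (k + 1)))) = none := by
        rw [List.find?_eq_none]
        intro b hb
        simp only [Bool.not_eq_true, List.any_eq_false]
        intro row hrow
        rw [pvARowDone_take]
        by_cases hd : pvDrawable nums row = true
        · obtain ⟨j, hj⟩ := List.mem_iff_getElem?.mp hb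
          obtain ⟨hs1, -⟩ := hmin j b row hj hrow hd
          simp only [hd, Bool.true_and, decide_eq_false_iff_not]
          omega
        · simp [Bool.eq_false_iff.mpr hd]
      rw [hfind]
      have h' : nums.take (k + 1) ++ rest = nums := by
        rw [htake, List.append_assoc]
        simpa using h
      exact ih (k + 1) h' (by omega)
    · have hkeq : k = s := by omega
      subst hkeq
      obtain ⟨row, hrow, hd, hstep⟩ := hrow
      have hbilt : bi < boards.length := by
        by_contra hc
        rw [List.getElem?_eq_none (by omega)] at hbi
        exact (Option.some_ne_none board hbi.symm).elim
      have hfind : boards.find? (fun b => b.any (pvARowDone (nums.take (k + 1)))) = some board := by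
        rw [List.find?_eq_some_iff_getElem]
        refine ⟨?_, bi, hbilt, ?_, ?_⟩
        · rw [List.any_eq_true]
          exact ⟨row, hrow, by rw [pvARowDone_take, hd, hstep]; simp⟩
        · have := List.getElem?_eq_getElem hbilt
          rw [this] at hbi
          exact Option.some.inj hbi
        · intro j hj
          simp only [Bool.not_eq_true', Bool.not_eq_true, List.any_eq_false]
          intro r' hr'
          rw [pvARowDone_take]
          by_cases hd' : pvDrawable nums r' = true
          · obtain ⟨hs1, hs2⟩ := hmin j boards[j] r'
              (List.getElem?_eq_getElem (by omega)) hr' hd'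
            simp only [hd', Bool.true_and, decide_eq_false_iff_not]
            intro hc
            exact absurd (hs2 hc) (by omega)
          · simp [Bool.eq_false_iff.mpr hd']
      rw [hfind]

theorem find_board_rows_eq (nums : List Int) (boards : List (List (List Int))) :
    find_board_rows nums boards = find_board_rows_alt nums boards := by
  unfold find_board_rows find_board_rows_alt
  by_cases hnil : nums = []
  · subst hnil
    rfl
  · rw [if_neg (by simp [hnil])]
    rw [pvBBoards_eq_foldl]
    cases hres : (pvCands nums 0 boards).foldl pvMin none with
    | none =>
      rw [foldl_pvMin_none_eq_none] at hres
      have hno : ∀ b ∈ boards, ∀ row ∈ b, pvDrawable nums row = false := by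
        intro b hb row hrow
        by_contra hc
        have hd : pvDrawable nums row = true := by
          cases h' : pvDrawable nums row
          · exact absurd h' hc
          · rfl
        obtain ⟨j, hj⟩ := List.mem_iff_getElem?.mp hb
        have : ((pvRowStep nums row, 0 + j), b) ∈ pvCands nums 0 boards :=
          (mem_pvCands nums boards 0 _).mpr ⟨j, b, row, hj, hrow, hd, rfl⟩
        rw [hres] at this
        simp at this
      have := pvALoop_no_cands nums boards hno nums 0 (by simp)
      simpa using this
    | some m =>
      obtain ⟨hmem, hminlt⟩ := foldl_pvMin_none_some _ m hres
      obtain ⟨j, board, row, hj, hrow, hd, hmeq⟩ := (mem_pvCands nums boards 0 m).mp hmem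
      have hmin : ∀ (bj : Nat) (b' : List (List Int)) (r' : List Int),
          boards[bj]? = some b' → r' ∈ b' → pvDrawable nums r' = true →
          pvRowStep nums row ≤ pvRowStep nums r' ∧
            (pvRowStep nums r' ≤ pvRowStep nums row → j ≤ bj) := by
        intro bj b' r' hbj hr' hd'
        have hc : ((pvRowStep nums r', 0 + bj), b') ∈ pvCands nums 0 boards :=
          (mem_pvCands nums boards 0 _).mpr ⟨bj, b', r', hbj, hr', hd', rfl⟩
        have := hminlt _ hc
        rw [hmeq] at this
        simp only [pvKeyLt, Bool.or_eq_false_iff, Bool.and_eq_false_iff,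
          decide_eq_false_iff_not, Nat.zero_add, beq_eq_false_iff_ne, ne_eq] at this
        constructor
        · omega
        · intro hle
          rcases this with ⟨h1, h2 | h2⟩
          · omega
          · omega
      have hfound := pvALoop_found nums boards (pvRowStep nums row) j board
        (pvRowStep_lt_length nums row hnil) hj ⟨row, hrow, hd, rfl⟩ hmin nums 0 (by simp)
        (Nat.zero_le _)
      rw [hmeq]
      show pvALoop boards [] nums = (some (nums.take (pvRowStep nums row + 1)), some board)
      simpa using hfound


-- ===== VERDICT (by name: the statement is the Claim_ definition above) =====
theorem find_board_rows_spec : Claim_equal_find_board_rows := by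
  unfold Claim_equal_find_board_rows Spec_find_board_rows
  intro input_nums input_boards _
  exact find_board_rows_eq input_nums input_boards
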